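-- pv_equiv track=rewrite | github.com/lee95292/AlgoGaza | PGMS/2021kakao_blind/1.py | solution
-- ===== SOURCE A (Python) =====
-- def solution(new_id):
--     new_id = new_id.lower()
--     answer=''
--     bf=''
--     for i in new_id:
--         if ord('0')<=ord(i)<=ord('9') or ord('a') <= ord(i) <=ord('z') or ord(i) in [ord('-'),ord('_'),ord('.')]:
--             if bf == '.' and i == '.':
--                 continue
--             answer += i
--             bf = i
--
--     if answer and answer[0] == '.':
--         answer = answer[1:]
--     if answer and answer[-1] == '.':
--         answer = answer[0:-1]
--     if answer == '':
--         answer += 'a'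
--     if len(answer) >=15:
--         answer=answer[:15]
--     if answer[-1] == '.':
--         answer = answer[0:-1]
--
--     if len(answer) <= 2:
--         while len(answer) <=2:
--             answer += answer[-1]
--     return answer
-- ===== SOURCE B (Python) =====
-- def solution(new_id):
--     # keep only the allowed characters of the lowercased id
--     s = ''.join(c for c in new_id.lower()
--                 if '0' <= c <= '9' or 'a' <= c <= 'z' or c in ('-', '_', '.'))
--     # collapse dot runs and drop leading/trailing dots in one split/join pass
--     s = '.'.join(p for p in s.split('.') if p)
--     if s == '':
--         s = 'a'
--     if len(s) >= 15:
--         s = s[:15]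
--         if s.endswith('.'):
--             s = s[:-1]
--     if len(s) < 3:
--         s = s + s[-1] * (3 - len(s))
--     return s
-- ===== Notes on version B (the rewrite author's own statement) =====
-- stated objective: idiomatic
-- what changed: A's single character scan with a previous-character flag for dot collapsing is replaced by a filter comprehension followed by a split('.')/join pipeline that collapses dot runs and strips boundary dots in one step, with the truncation/padding tail written arithmetically instead of with a while loop.
import Mathlib
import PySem

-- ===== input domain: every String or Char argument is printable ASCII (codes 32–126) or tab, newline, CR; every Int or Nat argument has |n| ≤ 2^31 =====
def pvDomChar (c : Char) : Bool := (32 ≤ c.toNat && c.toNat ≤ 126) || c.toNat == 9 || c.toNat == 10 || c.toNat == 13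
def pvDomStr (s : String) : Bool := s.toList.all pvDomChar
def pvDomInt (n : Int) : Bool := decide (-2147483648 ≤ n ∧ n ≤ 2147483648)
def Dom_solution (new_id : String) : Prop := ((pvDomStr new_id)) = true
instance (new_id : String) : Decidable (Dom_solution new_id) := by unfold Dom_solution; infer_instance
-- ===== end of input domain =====

-- B replaces A's single previous-character scan by a filter + split('.')/join pipeline with an
-- arithmetic padding step; the return values are proved equal on all inputs.

-- ===== PORT A =====
-- the ord-based validity test of A's big `if`
def validA (i : Char) : Bool :=
  (('0').toNat ≤ i.toNat && i.toNat ≤ ('9').toNat) ||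
  (('a').toNat ≤ i.toNat && i.toNat ≤ ('z').toNat) ||
  ((i.toNat = ('-').toNat) || (i.toNat = ('_').toNat) || (i.toNat = ('.').toNat))

-- A's for-loop, state (answer, bf)
def loopA : List Char → List Char → List Char → List Char
  | [], answer, _ => answer
  | i :: rest, answer, bf =>
    if validA i then
      if bf = ['.'] ∧ i = '.' then loopA rest answer bf
      else loopA rest (answer ++ [i]) [i]
    else loopA rest answer bf

-- A's `while len(answer) <= 2: answer += answer[-1]`
-- (`answer[-1]` on the empty string would be Python's IndexError: the `none` branch, unreachable in `solution`)
def padA (s : List Char) : List Char :=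
  if _h : s.length ≤ 2 then
    match PySem.List.pyGet? s (-1) with
    | some c => padA (s ++ [c])
    | none => s
  else s
termination_by 3 - s.length
decreasing_by simp; omega

def solution (new_id : String) : String :=
  let lowered := PySem.Str.lower new_id
  let a0 := loopA lowered.toList [] []
  let a1 := if a0 ≠ [] ∧ PySem.List.pyGet? a0 0 = some '.' then PySem.List.slice a0 (some 1) none else a0
  let a2 := if a1 ≠ [] ∧ PySem.List.pyGet? a1 (-1) = some '.' then PySem.List.slice a1 (some 0) (some (-1)) else a1
  let a3 := if a2 = [] then a2 ++ ['a'] else a2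
  let a4 := if 15 ≤ a3.length then PySem.List.slice a3 none (some 15) else a3
  -- `answer[-1]`: a4 is never empty when this line runs in Python; on [] pyGet? is none ≠ some '.'
  let a5 := if PySem.List.pyGet? a4 (-1) = some '.' then PySem.List.slice a4 (some 0) (some (-1)) else a4
  let a6 := if a5.length ≤ 2 then padA a5 else a5
  String.ofList a6

-- ===== PORT B =====
-- B's comparison/membership validity test
def validB (c : Char) : Bool :=
  ('0' ≤ c && c ≤ '9') || ('a' ≤ c && c ≤ 'z') || (c = '-' || c = '_' || c = '.')

def solution_alt (new_id : String) : String :=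
  let s0 := ((PySem.Str.lower new_id).toList).filter validB
  let s1 := PySem.Chars.join ['.'] ((PySem.Chars.splitOn s0 ['.']).filter (· ≠ []))
  let s2 := if s1 = [] then ['a'] else s1
  let s3 := if 15 ≤ s2.length then
      let t := PySem.List.slice s2 none (some 15)
      if PySem.Chars.endswith t ['.'] then PySem.List.slice t none (some (-1)) else t
    else s2
  -- `s[-1]`: s is never empty here in Python; the `none` branch is unreachable
  let s4 := if s3.length < 3 then
      match PySem.List.pyGet? s3 (-1) with
      | some c => s3 ++ PySem.List.pyRepeat [c] ((3 : Int) - s3.length)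
      | none => s3
    else s3
  String.ofList s4

-- ===== PRECONDITION & SPEC =====
def Spec_solution (new_id : String) (out : String) : Prop := out = solution_alt new_id
instance (new_id : String) (out : String) : Decidable (Spec_solution new_id out) := by unfold Spec_solution; infer_instance

-- ===== CLAIM (what is proved, stated in full; the proofs are below) =====
def Claim_equal_solution : Prop := ∀ (new_id : String), Dom_solution new_id → Spec_solution new_id (solution new_id)

-- ===== LEMMAS AND PROOFS =====

-- proof-side model of s.split('.')
def mySplit (pre : List Char) : List Char → List (List Char)
  | [] => [pre]
  | c :: r => if c = '.' then pre :: mySplit [] r else mySplit (pre ++ [c]) r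

-- proof-side model of A's scan after filtering: flag = "previous kept char was '.'"
def col2 : Bool → List Char → List Char
  | _, [] => []
  | b, c :: r => if c = '.' then (if b then col2 true r else '.' :: col2 true r) else c :: col2 false r

-- A's filtered scan, as a single recursion
def colF : Bool → List Char → List Char
  | _, [] => []
  | b, i :: r => if validA i then (if b ∧ i = '.' then colF b r else i :: colF (i = '.') r) else colF b r

-- "drop one trailing dot"
def stripTrail (l : List Char) : List Char :=
  if l.getLast? = some '.' then l.dropLast else l

theorem validB_eq_validA : ∀ c, validB c = validA c := by
  intro c
  have h : ∀ d : Char, decide (c = d) = decide (c.toNat = d.toNat) := by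
    intro d
    apply decide_eq_decide.mpr
    constructor
    · intro h; rw [h]
    · intro h; exact Char.ext (UInt32.toNat_inj.mp h)
  simp only [validA, validB, Char.le_def, UInt32.le_iff_toNat_le, h]
  rfl

theorem loopA_eq_colF : ∀ l ans bf, loopA l ans bf = ans ++ colF (decide (bf = ['.'])) l := by
  intro l
  induction l with
  | nil => intro ans bf; simp [loopA, colF]
  | cons i rest ih =>
    intro ans bf
    by_cases hv : validA i
    · by_cases hb : bf = ['.'] ∧ i = '.'
      · simp [loopA, colF, hb, ih]
      · rw [loopA, if_pos hv, if_neg hb, ih]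
        by_cases hd : i = '.'
        · have hbf : ¬ bf = ['.'] := fun h => hb ⟨h, hd⟩
          subst hd
          simp [colF, hv, hbf]
        · simp [colF, hv, hd]
    · simp [loopA, colF, hv, ih]

theorem colF_eq_col2 : ∀ l b, colF b l = col2 b (l.filter validA) := by
  intro l
  induction l with
  | nil => intro b; simp [colF, col2]
  | cons i r ih =>
    intro b
    by_cases hv : validA i
    · by_cases hd : i = '.'
      · subst hd
        by_cases hb : b
        · simp [colF, col2, hv, hb, ih]
        · simp at hb; simp [colF, col2, hv, hb, ih]
      · simp [colF, col2, hv, hd, ih]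
    · simp [colF, hv, ih]

theorem splitOn_go_eq_mySplit : ∀ fuel (l cur : List Char) (accs : List (List Char)),
    l.length < fuel →
    PySem.Chars.splitOn.go ['.'] fuel l cur accs = accs.reverse ++ mySplit cur.reverse l := by
  intro fuel
  induction fuel with
  | zero => intro l cur accs h; omega
  | succ fuel ih =>
    intro l cur accs h
    match l with
    | [] => simp [PySem.Chars.splitOn.go, mySplit]
    | c :: rest =>
      by_cases hd : c = '.'
      · subst hd
        rw [PySem.Chars.splitOn.go]
        rw [if_pos (by simp [List.isPrefixOf])]
        simp only [List.length_cons] at h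
        simp only [List.length_singleton, List.drop_one, List.tail_cons]
        rw [ih _ _ _ (by omega), mySplit, if_pos rfl]
        simp
      · rw [PySem.Chars.splitOn.go]
        rw [if_neg (by simp [List.isPrefixOf]; exact fun h => hd h.symm)]
        simp only [List.length_cons] at h
        rw [ih _ _ _ (by omega), mySplit]
        simp [hd]

theorem splitOn_eq_mySplit (u : List Char) : PySem.Chars.splitOn u ['.'] = mySplit [] u := by
  rw [PySem.Chars.splitOn, splitOn_go_eq_mySplit _ _ _ _ (by omega)]
  simp

theorem col2_true_head (u : List Char) : (col2 true u).head? ≠ some '.' := by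
  induction u with
  | nil => simp [col2]
  | cons c r ih =>
    by_cases hd : c = '.'
    · subst hd; simpa [col2] using ih
    · simp [col2, hd]

theorem stripLead_col2 (u : List Char) :
    (if (col2 false u).head? = some '.' then (col2 false u).tail else col2 false u) = col2 true u := by
  cases u with
  | nil => simp [col2]
  | cons c r =>
    by_cases hd : c = '.'
    · subst hd; simp [col2]
    · simp [col2, hd]

theorem stripTrail_append (x y : List Char) (hy : y ≠ []) :
    stripTrail (x ++ y) = x ++ stripTrail y := by
  unfold stripTrail
  rw [List.getLast?_append_of_ne_nil _ hy]
  split_ifs with h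
  · rw [List.dropLast_append_of_ne_nil hy]
  · rfl

theorem stripTrail_ne_nil (l : List Char) (h : l ≠ []) (hh : l.head? ≠ some '.') :
    stripTrail l ≠ [] := by
  match l with
  | [c] =>
    simp at hh
    simp [stripTrail, hh]
  | a :: b :: t =>
    rw [show a :: b :: t = [a] ++ (b :: t) from rfl, stripTrail_append _ _ (by simp)]
    simp

theorem join_filter_ne_nil (F : List (List Char)) (hF : ∀ p ∈ F, p ≠ []) :
    PySem.Chars.join ['.'] F = [] ↔ F = [] := by
  match F with
  | [] => simp [PySem.Chars.join, List.intercalate]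
  | f :: fs =>
    match fs with
    | [] =>
      have := hF f (by simp)
      simp [PySem.Chars.join, List.intercalate, this]
    | g :: gs =>
      have := hF f (by simp)
      simp [PySem.Chars.join_cons_cons, this]

theorem main_base :
    (stripTrail (col2 true []) = PySem.Chars.join ['.'] ((mySplit [] []).filter (· ≠ [])) ∧
     ∀ pre : List Char, pre ≠ [] → pre.getLast? ≠ some '.' →
       stripTrail (pre ++ col2 false []) = PySem.Chars.join ['.'] ((mySplit pre []).filter (· ≠ []))) := by
  constructor
  · simp [col2, mySplit, stripTrail, PySem.Chars.join, List.intercalate]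
  · intro pre hpre hlast
    simp only [col2, mySplit, List.append_nil]
    rw [List.filter_cons, if_pos (by simpa using hpre)]
    simp [PySem.Chars.join_singleton, stripTrail, hlast]

theorem main_lemma : ∀ n (u : List Char), u.length ≤ n →
    (stripTrail (col2 true u) = PySem.Chars.join ['.'] ((mySplit [] u).filter (· ≠ [])) ∧
     ∀ pre : List Char, pre ≠ [] → pre.getLast? ≠ some '.' →
       stripTrail (pre ++ col2 false u) = PySem.Chars.join ['.'] ((mySplit pre u).filter (· ≠ []))) := by
  intro n
  induction n with
  | zero =>
    intro u hu
    have : u = [] := by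
      cases u with
      | nil => rfl
      | cons a b => simp at hu
    subst this
    exact main_base
  | succ n ih =>
    intro u hu
    match u with
    | [] => exact main_base
    | c :: r =>
      have hr : r.length ≤ n := by simpa using hu
      obtain ⟨ihG, ihG'⟩ := ih r hr
      by_cases hd : c = '.'
      · subst hd
        have e1 : col2 true ('.' :: r) = col2 true r := by simp [col2]
        have e1' : col2 false ('.' :: r) = '.' :: col2 true r := by simp [col2]
        have e2 : ∀ pre, mySplit pre ('.' :: r) = pre :: mySplit [] r := by
          intro pre; rw [mySplit, if_pos rfl]
        constructor
        · rw [e1, e2, List.filter_cons, if_neg (by simp)]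
          exact ihG
        · intro pre hpre hlast
          rw [e1', e2, List.filter_cons, if_pos (by simpa using hpre)]
          by_cases hc : col2 true r = []
          · have hFnil : (mySplit [] r).filter (· ≠ []) = [] := by
              rw [← join_filter_ne_nil _ (by intro p hp; simpa using List.of_mem_filter hp)]
              rw [← ihG, hc]
              simp [stripTrail]
            rw [hc, hFnil]
            have hstr : stripTrail (pre ++ ['.']) = pre := by
              unfold stripTrail
              rw [List.getLast?_append_of_ne_nil _ (by simp)]
              rw [if_pos (by simp), List.dropLast_append_of_ne_nil (by simp)]
              simp
            simpa [PySem.Chars.join_singleton] using hstr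
          · have hne : stripTrail (col2 true r) ≠ [] :=
              stripTrail_ne_nil _ hc (col2_true_head r)
            have hF : (mySplit [] r).filter (· ≠ []) ≠ [] := by
              intro h
              apply hne
              rw [ihG, h]
              simp [PySem.Chars.join, List.intercalate]
            rw [show pre ++ '.' :: col2 true r = pre ++ ('.' :: col2 true r) from rfl,
                stripTrail_append _ _ (by simp)]
            rw [show stripTrail ('.' :: col2 true r) = '.' :: stripTrail (col2 true r) from by
              rw [show ('.' :: col2 true r) = ['.'] ++ col2 true r from rfl,
                  stripTrail_append _ _ hc]
              rfl]
            rw [ihG]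
            match hFm : (mySplit [] r).filter (· ≠ []) with
            | [] => exact absurd hFm hF
            | f :: fs =>
              rw [PySem.Chars.join_cons_cons]
              simp
      · have e1 : ∀ b, col2 b (c :: r) = c :: col2 false r := by
          intro b; simp [col2, hd]
        have e2 : ∀ pre, mySplit pre (c :: r) = mySplit (pre ++ [c]) r := by
          intro pre; rw [mySplit, if_neg hd]
        constructor
        · rw [e1, e2]
          have := ihG' [c] (by simp) (by simpa using hd)
          simpa using this
        · intro pre hpre hlast
          rw [e1, e2]
          have := ihG' (pre ++ [c]) (by simp) (by simpa using hd)
          rw [← this]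
          simp

theorem mySplit_no_dot : ∀ (u pre : List Char), '.' ∉ pre → ∀ p ∈ mySplit pre u, '.' ∉ p := by
  intro u
  induction u with
  | nil => intro pre hpre p hp; rw [mySplit] at hp; simpa using (by simpa using hp) ▸ hpre
  | cons c r ih =>
    intro pre hpre p hp
    by_cases hd : c = '.'
    · subst hd
      rw [mySplit, if_pos rfl] at hp
      rcases List.mem_cons.mp hp with h | h
      · exact h ▸ hpre
      · exact ih [] (by simp) p h
    · rw [mySplit, if_neg hd] at hp
      exact ih (pre ++ [c]) (by simp [hpre, Ne.symm hd]) p hp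

theorem join_all_ne_nil (F : List (List Char)) (hF : ∀ p ∈ F, p ≠ []) (hne : F ≠ []) :
    PySem.Chars.join ['.'] F ≠ [] := by
  match F with
  | [p] => simpa [PySem.Chars.join_singleton] using hF p (by simp)
  | p :: q :: t =>
    rw [PySem.Chars.join_cons_cons]
    simp [hF p (by simp)]

theorem join_last_ne_dot : ∀ (parts : List (List Char)),
    (∀ p ∈ parts, p ≠ [] ∧ '.' ∉ p) →
    (PySem.Chars.join ['.'] parts).getLast? ≠ some '.' := by
  intro parts
  induction parts with
  | nil => simp [PySem.Chars.join, List.intercalate]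
  | cons p t ih =>
    intro h
    match t with
    | [] =>
      rw [PySem.Chars.join_singleton]
      intro hl
      exact (h p (by simp)).2 (List.mem_of_getLast? hl)
    | q :: ts =>
      have hj : PySem.Chars.join ['.'] (q :: ts) ≠ [] :=
        join_all_ne_nil _ (fun p hp => (h p (by simp [hp])).1) (by simp)
      rw [PySem.Chars.join_cons_cons, List.getLast?_append_of_ne_nil _ hj]
      exact ih (fun p hp => h p (by simp [hp]))

theorem pad_eq (z : List Char) (hz : z ≠ []) :
    (if z.length ≤ 2 then padA z else z) =
    (if z.length < 3 then
       match PySem.List.pyGet? z (-1) with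
       | some c => z ++ PySem.List.pyRepeat [c] ((3 : Int) - z.length)
       | none => z
     else z) := by
  match z with
  | [a] =>
    have h1 : padA [a] = padA [a, a] := by
      rw [padA.eq_def]; simp [PySem.List.pyGet?, PySem.List.pyIdx?]
    have h2 : padA [a, a] = padA [a, a, a] := by
      rw [padA.eq_def]; simp [PySem.List.pyGet?, PySem.List.pyIdx?]
    have h3 : padA [a, a, a] = [a, a, a] := by
      rw [padA.eq_def]; simp
    rw [if_pos (by simp), if_pos (by simp), h1, h2, h3]
    simp [PySem.List.pyGet?, PySem.List.pyIdx?, PySem.List.pyRepeat_singleton]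
  | [a, b] =>
    have h2 : padA [a, b] = padA [a, b, b] := by
      rw [padA.eq_def]; simp [PySem.List.pyGet?, PySem.List.pyIdx?]
    have h3 : padA [a, b, b] = [a, b, b] := by
      rw [padA.eq_def]; simp
    rw [if_pos (by simp), if_pos (by simp), h2, h3]
    simp [PySem.List.pyGet?, PySem.List.pyIdx?, PySem.List.pyRepeat_singleton]
  | a :: b :: c :: t =>
    rw [if_neg (by simp), if_neg (by simp)]

-- bridges from the ports' PySem primitives to the proof-side forms
theorem pyGet?_zero_head (xs : List Char) : PySem.List.pyGet? xs 0 = xs.head? := by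
  cases xs <;> simp [PySem.List.pyGet?, PySem.List.pyIdx?]

theorem pyGet?_neg_one_last (xs : List Char) : PySem.List.pyGet? xs (-1) = xs.getLast? := by
  cases xs with
  | nil => simp [PySem.List.pyGet?, PySem.List.pyIdx?]
  | cons a t => simp [PySem.List.pyGet?, PySem.List.pyIdx?, List.getLast?_eq_getElem?]

theorem slice_take15 (xs : List Char) : PySem.List.slice xs none (some 15) = xs.take 15 := by
  rw [PySem.List.slice_to _ (by norm_num)]; rfl

theorem slice_dropLast (xs : List Char) : PySem.List.slice xs (some 0) (some (-1)) = xs.dropLast := by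
  simp [PySem.List.slice_zero_start, PySem.List.slice_to_neg_one]

theorem endswith_dot_iff (t : List Char) :
    (PySem.Chars.endswith t ['.'] = true) ↔ t.getLast? = some '.' := by
  rw [PySem.Chars.endswith_iff, List.getLast?_eq_some_iff]
  constructor
  · rintro ⟨s, rfl⟩; exact ⟨s, rfl⟩
  · rintro ⟨s, rfl⟩; exact ⟨s, rfl⟩

theorem stripLeadPort (xs : List Char) :
    (if xs ≠ [] ∧ PySem.List.pyGet? xs 0 = some '.' then PySem.List.slice xs (some 1) none else xs) =
    (if xs.head? = some '.' then xs.tail else xs) := by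
  rw [pyGet?_zero_head, PySem.List.slice_from_one]
  by_cases h : xs.head? = some '.'
  · rw [if_pos ⟨by intro e; rw [e] at h; simp at h, h⟩, if_pos h]
  · rw [if_neg (fun hc => h hc.2), if_neg h]

theorem stripTrailPort (xs : List Char) :
    (if xs ≠ [] ∧ PySem.List.pyGet? xs (-1) = some '.' then PySem.List.slice xs (some 0) (some (-1)) else xs) =
    stripTrail xs := by
  rw [pyGet?_neg_one_last, slice_dropLast]
  unfold stripTrail
  by_cases h : xs.getLast? = some '.'
  · rw [if_pos ⟨by intro e; rw [e] at h; simp at h, h⟩, if_pos h]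
  · rw [if_neg (fun hc => h hc.2), if_neg h]

theorem stripTrailPort2 (xs : List Char) :
    (if PySem.List.pyGet? xs (-1) = some '.' then PySem.List.slice xs (some 0) (some (-1)) else xs) =
    stripTrail xs := by
  rw [pyGet?_neg_one_last, slice_dropLast]
  rfl

theorem endswithPort (xs : List Char) :
    (if PySem.Chars.endswith xs ['.'] = true then PySem.List.slice xs none (some (-1)) else xs) =
    stripTrail xs := by
  rw [PySem.List.slice_to_neg_one]
  unfold stripTrail
  by_cases h : xs.getLast? = some '.'
  · rw [if_pos ((endswith_dot_iff xs).mpr h), if_pos h]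
  · rw [if_neg (fun hc => h ((endswith_dot_iff xs).mp hc)), if_neg h]

theorem stripTrail_length (l : List Char) : l.length ≤ (stripTrail l).length + 1 := by
  unfold stripTrail
  split_ifs with h
  · simp [List.length_dropLast]
    omega
  · omega

-- ===== VERDICT (by name: the statement is the Claim_ definition above) =====
theorem solution_spec : Claim_equal_solution := by
  intro new_id _
  show solution new_id = solution_alt new_id
  unfold solution solution_alt
  simp only []
  generalize (PySem.Str.lower new_id).toList = L
  have hu : List.filter validB L = List.filter validA L :=
    List.filter_congr (fun x _ => validB_eq_validA x)
  rw [hu]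
  have h0 : loopA L [] [] = col2 false (List.filter validA L) := by
    rw [loopA_eq_colF]
    rw [show (decide (([] : List Char) = ['.'])) = false from rfl]
    rw [colF_eq_col2]
    rfl
  rw [h0]
  set u := List.filter validA L with hu2
  rw [stripLeadPort (col2 false u), stripLead_col2, stripTrailPort (col2 true u)]
  rw [splitOn_eq_mySplit u]
  have hmain : stripTrail (col2 true u) =
      PySem.Chars.join ['.'] ((mySplit [] u).filter (· ≠ [])) := (main_lemma u.length u le_rfl).1
  rw [hmain]
  have hFmem : ∀ p ∈ (mySplit [] u).filter (· ≠ []), p ≠ [] ∧ '.' ∉ p := fun p hp =>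
    ⟨by simpa using List.of_mem_filter hp,
     mySplit_no_dot u [] (by simp) p (List.mem_of_mem_filter hp)⟩
  set J := PySem.Chars.join ['.'] ((mySplit [] u).filter (· ≠ [])) with hJ
  have hJlast : J.getLast? ≠ some '.' := join_last_ne_dot _ hFmem
  have h3 : (if J = [] then J ++ ['a'] else J) = (if J = [] then ['a'] else J) := by
    split_ifs with h
    · rw [h]; rfl
    · rfl
  rw [h3]
  set S2 := if J = [] then ['a'] else J with hS2
  have hS2ne : S2 ≠ [] := by
    rw [hS2]; split_ifs with h
    · simp
    · exact h
  have hS2last : S2.getLast? ≠ some '.' := by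
    rw [hS2]; split_ifs with h
    · simp
    · exact hJlast
  by_cases h15 : 15 ≤ S2.length
  · rw [if_pos h15, if_pos h15, slice_take15, stripTrailPort2, endswithPort]
    have hzne : stripTrail (S2.take 15) ≠ [] := by
      have hl : (S2.take 15).length = 15 := by rw [List.length_take]; omega
      have := stripTrail_length (S2.take 15)
      intro h
      rw [h] at this
      simp at this
      omega
    exact congrArg String.ofList (pad_eq _ hzne)
  · rw [if_neg h15, if_neg h15, stripTrailPort2]
    rw [show stripTrail S2 = S2 from by unfold stripTrail; rw [if_neg hS2last]]
    exact congrArg String.ofList (pad_eq S2 hS2ne)
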